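-- pv_equiv track=rewrite | github.com/StevenXoFk/Tarea-taller-Tkinter | convertidor.py | base12_a_base8
-- ===== SOURCE A (Python) =====
-- def contarLetras(text):
--     contador = 0
--     for i in text:
--         contador += 1
--     return contador
--
-- def base10_a_base8(numero):
--     decimal = 0
--     exponente = 0
--
--     while numero > 0:
--         digitos = numero % 10
--         decimal += digitos * (10 ** exponente)
--         numero //= 10
--         exponente += 1
--
--     binario = 0
--     valor = 1
--     while decimal > 0:
--         todo = decimal % 8
--         binario += todo * valor
--         decimal //= 8
--         valor *= 10
--
--     return binario
--
-- def base12_a_base8(numero):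
--     res = 0
--     exponente = 0
--     indice = contarLetras(numero) -1
--     while (indice > -1):
--         if (numero[indice] == "A"):
--             digito = 10
--         elif (numero[indice] == "B"):
--             digito = 11
--         elif (numero[indice] == "C"):
--             digito = 12
--         else:
--             digito = int(numero[indice])
--
--         res += digito *(12 **exponente)
--         exponente += 1
--         indice -= 1
--     res = base10_a_base8(res)
--     return res
-- ===== SOURCE B (Python) =====
-- def base12_a_base8(numero):
--     # Horner parse of the base-12 string (A=10, B=11, C=12 as in the original),
--     # then one direct loop building the octal digits as a decimal-looking int.
--     res = 0
--     for ch in numero: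
--         if ch == "A":
--             d = 10
--         elif ch == "B":
--             d = 11
--         elif ch == "C":
--             d = 12
--         else:
--             d = int(ch)
--         res = res * 12 + d
--     out = 0
--     place = 1
--     while res > 0:
--         out += (res % 8) * place
--         res //= 8
--         place *= 10
--     return out
-- ===== Notes on version B (the rewrite author's own statement) =====
-- stated objective: simpler
-- what changed: Left-to-right Horner parse replaces the reverse-indexed 12**exponente loop, and the redundant identity decimal-reconstruction pass of base10_a_base8 is dropped, leaving a single octal-digit loop.
import Mathlib
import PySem

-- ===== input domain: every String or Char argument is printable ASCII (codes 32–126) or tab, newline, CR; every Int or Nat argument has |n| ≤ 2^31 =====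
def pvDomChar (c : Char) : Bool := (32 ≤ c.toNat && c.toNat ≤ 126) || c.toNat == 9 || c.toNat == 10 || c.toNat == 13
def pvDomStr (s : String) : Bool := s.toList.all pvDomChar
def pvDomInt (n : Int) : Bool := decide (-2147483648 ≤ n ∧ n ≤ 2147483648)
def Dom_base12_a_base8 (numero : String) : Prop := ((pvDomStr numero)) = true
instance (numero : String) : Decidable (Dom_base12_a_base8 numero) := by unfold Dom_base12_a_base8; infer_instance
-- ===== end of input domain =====

-- B parses the base-12 string left-to-right by Horner's rule and converts to the
-- octal-as-decimal integer in one loop, dropping A's reverse-indexed power loop and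
-- the redundant decimal-reconstruction pass (objective: simpler).


-- the A/B/C-or-int(ch) digit decoding, identical if-chain in both Python sources;
-- int(ch) = none (ValueError) is excluded by Pre_, .getD 0 is never reached under Pre_
def pvDigito (c : Char) : Int :=
  if c = 'A' then 10
  else if c = 'B' then 11
  else if c = 'C' then 12
  else (PySem.Int.ofStr? (String.ofList [c])).getD 0

-- ===== PORT A =====
def contarLetras (text : String) : Int :=
  text.toList.foldl (fun contador _ => contador + 1) 0

-- first while of base10_a_base8 (decimal reconstruction)
def pvLoop1 (numero decimal : Int) (exponente : Nat) : Int :=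
  if 0 < numero then
    pvLoop1 (PySem.Int.floordiv numero 10)
      (decimal + PySem.Int.mod numero 10 * 10 ^ exponente) (exponente + 1)
  else decimal
termination_by numero.toNat
decreasing_by
  rw [PySem.Int.floordiv_eq_ediv_of_pos (by omega : (0:Int) < 10)]; omega

-- second while of base10_a_base8 (octal digits)
def pvLoop2 (decimal binario valor : Int) : Int :=
  if 0 < decimal then
    pvLoop2 (PySem.Int.floordiv decimal 8) (binario + PySem.Int.mod decimal 8 * valor) (valor * 10)
  else binario
termination_by decimal.toNat
decreasing_by
  rw [PySem.Int.floordiv_eq_ediv_of_pos (by omega : (0:Int) < 8)]; omega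

def base10_a_base8 (numero : Int) : Int :=
  pvLoop2 (pvLoop1 numero 0 0) 0 1

-- the while (indice > -1) loop; numero[indice] is in range whenever the loop runs
def pvLoopA (cs : List Char) (res : Int) (exponente : Nat) (indice : Int) : Int :=
  if indice > -1 then
    pvLoopA cs (res + pvDigito (PySem.List.pyGetD cs indice ' ') * 12 ^ exponente)
      (exponente + 1) (indice - 1)
  else res
termination_by (indice + 1).toNat
decreasing_by omega

def base12_a_base8 (numero : String) : Int :=
  base10_a_base8 (pvLoopA numero.toList 0 0 (contarLetras numero - 1))

-- ===== PORT B =====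
def pvHorner (cs : List Char) : Int :=
  cs.foldl (fun res c => res * 12 + pvDigito c) 0

def pvOct (res out place : Int) : Int :=
  if 0 < res then
    pvOct (PySem.Int.floordiv res 8) (out + PySem.Int.mod res 8 * place) (place * 10)
  else out
termination_by res.toNat
decreasing_by
  rw [PySem.Int.floordiv_eq_ediv_of_pos (by omega : (0:Int) < 8)]; omega

def base12_a_base8_alt (numero : String) : Int :=
  pvOct (pvHorner numero.toList) 0 1

-- ===== PRECONDITION & SPEC =====
-- Pre_ excludes exactly the strings with a character other than 0-9/A/B/C,
-- on which Python's int(ch) raises ValueError (in A and in B alike).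
def Pre_base12_a_base8 (numero : String) : Prop :=
  (numero.toList.all fun c => c ∈ ['0','1','2','3','4','5','6','7','8','9','A','B','C']) = true
instance (numero : String) : Decidable (Pre_base12_a_base8 numero) := by
  unfold Pre_base12_a_base8; infer_instance

def pvWitness_base12_a_base8 : String := "1A2C"

def Spec_base12_a_base8 (numero : String) (out : Int) : Prop := out = base12_a_base8_alt numero
instance (numero : String) (out : Int) : Decidable (Spec_base12_a_base8 numero out) := by
  unfold Spec_base12_a_base8; infer_instance

-- ===== CLAIM (what is proved, stated in full; the proofs are below) =====
def Claim_equal_base12_a_base8 : Prop := ∀ (numero : String), Dom_base12_a_base8 numero → Pre_base12_a_base8 numero → Spec_base12_a_base8 numero (base12_a_base8 numero)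

-- ===== LEMMAS AND PROOFS =====

theorem contarLetras_eq (text : String) : contarLetras text = (text.toList.length : Int) := by
  unfold contarLetras
  suffices h : ∀ (l : List Char) (a : Int), l.foldl (fun c _ => c + 1) a = a + l.length by
    simpa using h text.toList 0
  intro l; induction l with
  | nil => simp
  | cons x xs ih => intro a; simp [List.foldl_cons, ih]; ring

theorem pvHorner_snoc (cs : List Char) (c : Char) :
    pvHorner (cs ++ [c]) = pvHorner cs * 12 + pvDigito c := by
  unfold pvHorner; simp

theorem pvLoopA_eq (cs : List Char) (k : Nat) (hk : k ≤ cs.length) :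
    ∀ (res : Int) (e : Nat), pvLoopA cs res e ((k : Int) - 1) = res + pvHorner (cs.take k) * 12 ^ e := by
  induction k with
  | zero =>
    intro res e
    rw [pvLoopA]
    simp [pvHorner]
  | succ k ih =>
    intro res e
    have hklt : k < cs.length := hk
    rw [pvLoopA]
    have hidx : ((k : Int) + 1 - 1 : Int) = (k : Int) := by ring
    simp only [show ((k + 1 : Nat) : Int) - 1 = (k : Int) by push_cast; ring]
    rw [if_pos (by omega)]
    have hget : PySem.List.pyGetD cs ((k : Int)) ' ' = cs[k] := by
      rw [PySem.List.pyGetD_natCast]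
      simp [List.getD_eq_getElem?_getD, hklt]
    rw [hget]
    have := ih (Nat.le_of_lt hklt) (res + pvDigito cs[k] * 12 ^ e) (e + 1)
    rw [show ((k : Int)) = (k : Int) + 1 - 1 by ring] at this ⊢
    rw [this]
    rw [show cs.take (k + 1) = cs.take k ++ [cs[k]] from (List.take_concat_get' cs k hklt).symm]
    rw [pvHorner_snoc]
    ring

theorem pvLoop1_id (numero decimal : Int) (exponente : Nat) :
    pvLoop1 numero decimal exponente = decimal + max numero 0 * 10 ^ exponente := by
  induction numero, decimal, exponente using pvLoop1.induct with
  | case1 n d e h ih =>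
    rw [pvLoop1, if_pos h, ih]
    have hsplit := PySem.Int.floordiv_mul_add_mod n 10
    have hfd : 0 ≤ PySem.Int.floordiv n 10 := by
      rw [PySem.Int.floordiv_eq_ediv_of_pos (by omega : (0:Int) < 10)]; omega
    rw [max_eq_left hfd, max_eq_left (by omega : (0:Int) ≤ n), pow_succ]
    linear_combination (10:Int) ^ e * hsplit
  | case2 n d e h =>
    rw [pvLoop1, if_neg h, max_eq_right (by omega : n ≤ 0)]
    ring

theorem pvLoop2_eq_pvOct (a : Int) : ∀ (b c : Int), pvLoop2 a b c = pvOct a b c := by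
  induction a, (0 : Int), (0 : Int) using pvLoop2.induct with
  | case1 d bi v h ih =>
    intro b c
    rw [pvLoop2, pvOct, if_pos h, if_pos h, ih]
  | case2 d bi v h =>
    intro b c
    rw [pvLoop2, pvOct, if_neg h, if_neg h]

theorem pvDigito_nonneg (c : Char)
    (hc : c ∈ ['0','1','2','3','4','5','6','7','8','9','A','B','C']) : 0 ≤ pvDigito c := by
  fin_cases hc <;> decide

theorem pvHorner_nonneg (cs : List Char)
    (h : ∀ c ∈ cs, c ∈ ['0','1','2','3','4','5','6','7','8','9','A','B','C']) :
    0 ≤ pvHorner cs := by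
  unfold pvHorner
  suffices hh : ∀ (l : List Char), (∀ c ∈ l, c ∈ ['0','1','2','3','4','5','6','7','8','9','A','B','C']) →
      ∀ r : Int, 0 ≤ r → 0 ≤ l.foldl (fun res c => res * 12 + pvDigito c) r by
    exact hh cs h 0 le_rfl
  intro l; induction l with
  | nil => intro _ r hr; simpa
  | cons x xs ih =>
    intro hl r hr
    simp only [List.foldl_cons]
    exact ih (fun c hc => hl c (List.mem_cons_of_mem _ hc)) _
      (by have := pvDigito_nonneg x (hl x List.mem_cons_self); nlinarith)

-- ===== VERDICT (by name: the statement is the Claim_ definition above) =====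
theorem base12_a_base8_spec : Claim_equal_base12_a_base8 := by
  intro numero _hdom hpre
  unfold Spec_base12_a_base8 base12_a_base8 base12_a_base8_alt base10_a_base8
  rw [contarLetras_eq]
  rw [pvLoopA_eq numero.toList numero.toList.length le_rfl 0 0]
  rw [List.take_length]
  have hpre' : ∀ c ∈ numero.toList, c ∈ ['0','1','2','3','4','5','6','7','8','9','A','B','C'] := by
    simpa [Pre_base12_a_base8, List.all_eq_true] using hpre
  have hnn : 0 ≤ pvHorner numero.toList := pvHorner_nonneg _ hpre'
  rw [show (0 : Int) + pvHorner numero.toList * 12 ^ 0 = pvHorner numero.toList by ring]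
  rw [pvLoop1_id _ 0 0, max_eq_left hnn]
  rw [show (0 : Int) + pvHorner numero.toList * 10 ^ 0 = pvHorner numero.toList by ring]
  exact pvLoop2_eq_pvOct _ 0 1
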